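-- pv_equiv track=rewrite | github.com/AlexandreLEGAL/IUT | PycharmProjects/SDD_Python/TD2.py | frequences_initiales
-- ===== SOURCE A (Python) =====
-- def frequences_initiales(liste):
--     dico = {}
--     for i in range(len(liste)):
--         initiale = liste[i][0]
--         if initiale in dico.keys():
--             dico[initiale] = dico[initiale] + 1
--         else:
--             dico[initiale] = 1
--     return dico
-- ===== SOURCE B (Python) =====
-- def frequences_initiales(liste):
--     initiales = [e[0] for e in liste]
--     dico = {}
--     for c in initiales:
--         if c not in dico:
--             dico[c] = initiales.count(c)
--     return dico
-- ===== Notes on version B (the rewrite author's own statement) =====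
-- stated objective: alternative
-- what changed: Replaces A's single pass of incremental dict-counter updates by a two-phase plan: first extract all initials, then insert each distinct initial once with its total count obtained by list.count.
import Mathlib
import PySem

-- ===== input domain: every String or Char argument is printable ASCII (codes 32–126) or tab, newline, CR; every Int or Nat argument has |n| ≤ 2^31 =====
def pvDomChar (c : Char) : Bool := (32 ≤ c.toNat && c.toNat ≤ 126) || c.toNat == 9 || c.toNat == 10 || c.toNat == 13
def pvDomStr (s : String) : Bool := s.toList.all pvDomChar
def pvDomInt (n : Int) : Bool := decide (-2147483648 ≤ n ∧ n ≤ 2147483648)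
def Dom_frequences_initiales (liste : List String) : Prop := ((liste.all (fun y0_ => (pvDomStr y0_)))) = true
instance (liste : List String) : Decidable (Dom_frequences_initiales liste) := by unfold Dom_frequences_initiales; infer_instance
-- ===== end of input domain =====

-- B replaces A's single incremental dict-counting pass by extracting the initials first and
-- inserting each distinct initial once with its total count (alternative decomposition, not faster).

-- e[0] as the one-character Python string (none = IndexError, excluded by Pre_; "" is a don't-care filler)
def pvInitiale (e : String) : String :=
  match PySem.Str.pyGet? e 0 with
  | some c => String.ofList [c]
  | none => ""

-- ===== PORT A =====
def frequences_initiales (liste : List String) : List (String × Int) :=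
  ((PySem.List.pyRange 0 (PySem.List.len liste) 1).foldl
    (fun dico i =>
      (fun dico (initiale : String) =>
        if dico.contains initiale then dico.insert initiale (dico.getD initiale 0 + 1)
        else dico.insert initiale 1) dico (pvInitiale (PySem.List.pyGetD liste i "")))
    PySem.Dict.empty).items

-- ===== PORT B =====
def frequences_initiales_alt (liste : List String) : List (String × Int) :=
  ((liste.map pvInitiale).foldl
    (fun dico c =>
      if dico.contains c then dico
      else dico.insert c ((PySem.List.count (liste.map pvInitiale) c : Nat) : Int))
    PySem.Dict.empty).items

-- ===== PRECONDITION & SPEC =====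
-- Pre_ excludes lists containing an empty string, on which the Python A raises IndexError at liste[i][0].
def Pre_frequences_initiales (liste : List String) : Prop := ∀ s ∈ liste, s ≠ ""
instance (liste : List String) : Decidable (Pre_frequences_initiales liste) := by
  unfold Pre_frequences_initiales; infer_instance

def pvWitness_frequences_initiales : List String := ["abc", "axe", "boat"]

def Spec_frequences_initiales (liste : List String) (out : List (String × Int)) : Prop := out = frequences_initiales_alt liste
instance (liste : List String) (out : List (String × Int)) : Decidable (Spec_frequences_initiales liste out) := by unfold Spec_frequences_initiales; infer_instance

-- ===== CLAIM (what is proved, stated in full; the proofs are below) =====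
def Claim_equal_frequences_initiales : Prop := ∀ (liste : List String), Dom_frequences_initiales liste → Pre_frequences_initiales liste → Spec_frequences_initiales liste (frequences_initiales liste)

-- ===== LEMMAS AND PROOFS =====

-- A's loop body, named so the fold-shape lemmas can be applied to it
def pvStepA (dico : PySem.Dict String Int) (initiale : String) : PySem.Dict String Int :=
  if dico.contains initiale then dico.insert initiale (dico.getD initiale 0 + 1)
  else dico.insert initiale 1

-- A's loop body equals the canonical counter step (the two branches merge via getD_of_not_contains)
lemma stepA_eq (d : PySem.Dict String Int) (c : String) :
    pvStepA d c = d.insert c (d.getD c 0 + 1) := by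
  unfold pvStepA
  by_cases h : d.contains c = true
  · simp [h]
  · simp only [Bool.not_eq_true] at h
    simp [h, PySem.Dict.getD_of_not_contains d 0 h]

-- B's loop: inserting a fixed value per fresh key grows the items list exactly as Set.add grows the key set
lemma foldB_items (v : String → Int) :
    ∀ (l s : List String),
      ((l.foldl (fun d c => if d.contains c then d else d.insert c (v c))
          (PySem.Dict.mk (s.map (fun c => (c, v c))))).items)
        = (l.foldl PySem.Set.add s).map (fun c => (c, v c)) := by
  intro l
  induction l with
  | nil => intro s; rfl
  | cons c t ih =>
    intro s
    have hc : (PySem.Dict.mk (s.map (fun c => (c, v c)))).contains c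
        = PySem.Set.contains s c := by
      simp [PySem.Dict.contains_mk, PySem.Set.contains, List.any_map, Function.comp_def,
        List.any_beq']
    by_cases h : PySem.Set.contains s c = true
    · simp only [List.foldl_cons, PySem.Set.add, hc, h, if_true]
      exact ih s
    · simp only [Bool.not_eq_true] at h
      have hins : (PySem.Dict.mk (s.map (fun c => (c, v c)))).insert c (v c)
          = PySem.Dict.mk ((s ++ [c]).map (fun c => (c, v c))) := by
        apply PySem.Dict.ext
        rw [PySem.Dict.items_insert_of_not_contains _ _ (by rw [hc]; exact h)]
        simp
      simp only [List.foldl_cons, PySem.Set.add, hc, h, Bool.false_eq_true, if_false, hins]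
      exact ih (s ++ [c])

-- ===== VERDICT (by name: the statement is the Claim_ definition above) =====
theorem frequences_initiales_spec : Claim_equal_frequences_initiales := by
  intro liste _ _
  unfold Spec_frequences_initiales frequences_initiales frequences_initiales_alt
  show ((PySem.List.pyRange 0 (PySem.List.len liste) 1).foldl
      (fun dico i => pvStepA dico (pvInitiale (PySem.List.pyGetD liste i "")))
      PySem.Dict.empty).items = _
  rw [PySem.List.foldl_pyRange_zero_pyGetD liste ""
      (fun d e => pvStepA d (pvInitiale e)) PySem.Dict.empty]
  rw [← List.foldl_map (f := pvInitiale) (g := pvStepA)]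
  set inits := liste.map pvInitiale with hinits
  -- A side: canonical counter
  have hA : (inits.foldl pvStepA PySem.Dict.empty).items
      = (PySem.Set.ofList inits).map (fun k => (k, ((List.count k inits : Nat) : Int))) := by
    have hstep : pvStepA = fun d c => d.insert c (d.getD c 0 + 1) := by
      funext d c; exact stepA_eq d c
    rw [hstep, PySem.Dict.foldl_insert_getD_add_one_eq_counter, PySem.Dict.items_counter]
  -- B side: fresh-key inserts follow Set.add
  have hB : (inits.foldl
      (fun dico c =>
        if dico.contains c then dico
        else dico.insert c ((PySem.List.count inits c : Nat) : Int)) PySem.Dict.empty).items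
      = (PySem.Set.ofList inits).map
          (fun c => (c, ((PySem.List.count inits c : Nat) : Int))) := by
    rw [PySem.Set.ofList_eq_foldl]
    exact foldB_items (fun c => ((PySem.List.count inits c : Nat) : Int)) inits []
  rw [hA, hB]
  simp [PySem.List.count_eq, List.count]
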